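-- pv_equiv track=rewrite | github.com/mobeen786822/job-application-assistant | tools/resume_bot.py | _build_cover_letter_html
-- ===== SOURCE A (Python) =====
-- def _parse_cover_letter_paragraphs(cover_text: str) -> list[tuple[str, str]]:
--     raw_lines = [line.rstrip() for line in cover_text.strip().splitlines()]
--     lines = [line for line in raw_lines if line.strip() or line == '']
--
--     paragraphs: list[str] = []
--     buf: list[str] = []
--     for line in lines:
--         if not line.strip():
--             if buf:
--                 paragraphs.append(' '.join(buf).strip())
--                 buf = []
--             continue
--         buf.append(line.strip())
--     if buf:
--         paragraphs.append(' '.join(buf).strip())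
--
--     styled: list[tuple[str, str]] = []
--     for i, para in enumerate(paragraphs):
--         lower = para.lower()
--         if lower.startswith('kind regards'):
--             styled.append(('signature', 'Kind regards,'))
--             if i + 1 < len(paragraphs):
--                 styled.append(('signature', paragraphs[i + 1]))
--             break
--         styled.append(('body', para))
--     return styled
--
-- def _build_cover_letter_html(style_css: str, header_html: str, cover_text: str) -> str:
--     paragraphs = _parse_cover_letter_paragraphs(cover_text)
--     blocks = []
--     for cls, text in paragraphs:
--         class_attr = 'signature' if cls == 'signature' else 'body'
--         blocks.append(f'<p class="{class_attr}">{text}</p>')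
--     body = "\n".join(blocks)
--     return f"""<!DOCTYPE html>
-- <html lang="en">
-- <head>
-- <meta charset="UTF-8">
-- <meta name="viewport" content="width=device-width, initial-scale=1.0">
-- <title>Cover Letter</title>
-- <style>
-- {style_css}
-- .section-title {{ font-weight: 700; margin-top: 16px; }}
-- .cover-letter p {{ margin: 0 0 10px; }}
-- .cover-letter .signature {{ margin-top: 10px; }}
-- @media print {{
--   .page {{ padding-top: 6mm; }}
-- }}
-- @media screen {{
--   .page {{ padding-top: 24px; }}
-- }}
-- </style>
-- </head>
-- <body>
-- <div class="page">
-- {header_html}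
-- <div class="section">
--   <div class="section-title">Cover Letter</div>
--   <div class="cover-letter">
--     {body}
--   </div>
-- </div>
-- </div>
-- </body>
-- </html>
-- """
-- ===== SOURCE B (Python) =====
-- def _build_cover_letter_html(style_css: str, header_html: str, cover_text: str) -> str:
--     def chunks(lines):
--         # group the lines into blank-separated chunks, built back-to-front
--         if not lines:
--             return [[]]
--         groups = chunks(lines[1:])
--         s = lines[0].strip()
--         if s:
--             return [[s] + groups[0]] + groups[1:]
--         return [[]] + groups
--
--     paragraphs = [' '.join(g).strip()
--                   for g in chunks(cover_text.strip().splitlines()) if g]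
--
--     def style(paras):
--         if not paras:
--             return []
--         head, rest = paras[0], paras[1:]
--         if head.lower().startswith('kind regards'):
--             return [('signature', 'Kind regards,')] + [('signature', p) for p in rest[:1]]
--         return [('body', head)] + style(rest)
--
--     body = "\n".join(f'<p class="{cls}">{text}</p>' for cls, text in style(paragraphs))
--     return f"""<!DOCTYPE html>
-- <html lang="en">
-- <head>
-- <meta charset="UTF-8">
-- <meta name="viewport" content="width=device-width, initial-scale=1.0">
-- <title>Cover Letter</title>
-- <style>
-- {style_css}
-- .section-title {{ font-weight: 700; margin-top: 16px; }}
-- .cover-letter p {{ margin: 0 0 10px; }}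
-- .cover-letter .signature {{ margin-top: 10px; }}
-- @media print {{
--   .page {{ padding-top: 6mm; }}
-- }}
-- @media screen {{
--   .page {{ padding-top: 24px; }}
-- }}
-- </style>
-- </head>
-- <body>
-- <div class="page">
-- {header_html}
-- <div class="section">
--   <div class="section-title">Cover Letter</div>
--   <div class="cover-letter">
--     {body}
--   </div>
-- </div>
-- </div>
-- </body>
-- </html>
-- """
-- ===== Notes on version B (the rewrite author's own statement) =====
-- stated objective: alternative
-- what changed: The left-to-right buffer/flush paragraph accumulator is replaced by a right-recursive blank-separated grouping of the lines, and the enumerate+index+break styling pass by structural recursion on the paragraph list; the HTML template stays byte-identical.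
import Mathlib
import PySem

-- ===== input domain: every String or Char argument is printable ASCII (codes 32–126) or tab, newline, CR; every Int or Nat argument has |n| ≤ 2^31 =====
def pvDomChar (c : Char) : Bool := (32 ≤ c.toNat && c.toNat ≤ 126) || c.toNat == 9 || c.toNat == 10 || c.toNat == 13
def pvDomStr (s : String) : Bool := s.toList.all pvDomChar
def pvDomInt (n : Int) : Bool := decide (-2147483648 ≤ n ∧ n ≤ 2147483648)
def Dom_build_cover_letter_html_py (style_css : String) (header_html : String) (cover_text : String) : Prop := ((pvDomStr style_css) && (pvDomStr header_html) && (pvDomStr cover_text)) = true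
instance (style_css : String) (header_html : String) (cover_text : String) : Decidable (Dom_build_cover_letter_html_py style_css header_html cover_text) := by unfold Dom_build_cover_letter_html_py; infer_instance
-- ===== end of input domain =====

-- B replaces A's left-to-right buffer/flush paragraph accumulator by a right-recursive
-- blank-separated grouping and the enumerate+index+break styling pass by structural
-- recursion on the paragraph list (objective: alternative decomposition, same cost).

-- shared HTML template (the f-string literal, byte-identical in both Pythons)
def pvCoverTemplate (style_css : String) (header_html : String) (body : List Char) : String :=
  "<!DOCTYPE html>\n<html lang=\"en\">\n<head>\n<meta charset=\"UTF-8\">\n<meta name=\"viewport\" content=\"width=device-width, initial-scale=1.0\">\n<title>Cover Letter</title>\n<style>\n"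
  ++ style_css
  ++ "\n.section-title { font-weight: 700; margin-top: 16px; }\n.cover-letter p { margin: 0 0 10px; }\n.cover-letter .signature { margin-top: 10px; }\n@media print {\n  .page { padding-top: 6mm; }\n}\n@media screen {\n  .page { padding-top: 24px; }\n}\n</style>\n</head>\n<body>\n<div class=\"page\">\n"
  ++ header_html
  ++ "\n<div class=\"section\">\n  <div class=\"section-title\">Cover Letter</div>\n  <div class=\"cover-letter\">\n    "
  ++ String.ofList body
  ++ "\n  </div>\n</div>\n</div>\n</body>\n</html>\n"

-- ===== PORT A =====
-- ' '.join(buf).strip()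
def pvA_mkPara (buf : List (List Char)) : List Char :=
  PySem.Chars.strip (PySem.Chars.join [' '] buf)

-- one iteration of A's buffer loop; state = (paragraphs, buf)
def pvA_step (st : List (List Char) × List (List Char)) (line : List Char) :
    List (List Char) × List (List Char) :=
  if (PySem.Chars.strip line).isEmpty then
    if st.2.isEmpty then st else (st.1 ++ [pvA_mkPara st.2], [])
  else (st.1, st.2 ++ [PySem.Chars.strip line])

def pvA_paragraphs (cover_text : String) : List (List Char) :=
  let raw_lines := (PySem.Chars.splitlines (PySem.Chars.strip cover_text.toList)).map PySem.Chars.rstrip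
  let lines := raw_lines.filter (fun l => !(PySem.Chars.strip l).isEmpty || l.isEmpty)
  let st := lines.foldl pvA_step ([], [])
  if st.2.isEmpty then st.1 else st.1 ++ [pvA_mkPara st.2]

-- 'for i, para in enumerate(paragraphs): … break' as an index recursion
def pvA_styleGo (paras : List (List Char)) (i : Nat) : List (String × List Char) :=
  if h : i < paras.length then
    let para := paras[i]
    if PySem.Chars.startswith (PySem.Chars.lower para) ("kind regards".toList) then
      ("signature", "Kind regards,".toList) ::
        (if i + 1 < paras.length then [("signature", paras.getD (i + 1) [])] else [])
    else ("body", para) :: pvA_styleGo paras (i + 1)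
  else []
  termination_by paras.length - i

def pvA_block (p : String × List Char) : List Char :=
  "<p class=\"".toList ++ (if p.1 == "signature" then "signature" else "body").toList
    ++ "\">".toList ++ p.2 ++ "</p>".toList

def build_cover_letter_html_py (style_css : String) (header_html : String) (cover_text : String) : String :=
  let styled := pvA_styleGo (pvA_paragraphs cover_text) 0
  let blocks := styled.foldl (fun acc p => acc ++ [pvA_block p]) []
  pvCoverTemplate style_css header_html (PySem.Chars.join ['\n'] blocks)

-- ===== PORT B =====
-- group the lines into blank-separated chunks, built back-to-front
def pvB_chunks : List (List Char) → List (List (List Char))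
  | [] => [[]]
  | l :: rest =>
    let groups := pvB_chunks rest
    let s := PySem.Chars.strip l
    if !s.isEmpty then (s :: groups.headD []) :: groups.tail
    else [] :: groups

def pvB_paragraphs (cover_text : String) : List (List Char) :=
  ((pvB_chunks (PySem.Chars.splitlines (PySem.Chars.strip cover_text.toList))).filter
      (fun g => !g.isEmpty)).map
    (fun g => PySem.Chars.strip (PySem.Chars.join [' '] g))

def pvB_style : List (List Char) → List (String × List Char)
  | [] => []
  | head :: rest =>
    if PySem.Chars.startswith (PySem.Chars.lower head) ("kind regards".toList) then
      ("signature", "Kind regards,".toList) :: (rest.take 1).map (fun p => ("signature", p))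
    else ("body", head) :: pvB_style rest

def build_cover_letter_html_py_alt (style_css : String) (header_html : String) (cover_text : String) : String :=
  let body := PySem.Chars.join ['\n']
    ((pvB_style (pvB_paragraphs cover_text)).map
      (fun p => "<p class=\"".toList ++ p.1.toList ++ "\">".toList ++ p.2 ++ "</p>".toList))
  pvCoverTemplate style_css header_html body

-- ===== PRECONDITION & SPEC =====
def Spec_build_cover_letter_html_py (style_css : String) (header_html : String) (cover_text : String) (out : String) : Prop := out = build_cover_letter_html_py_alt style_css header_html cover_text
instance (style_css : String) (header_html : String) (cover_text : String) (out : String) : Decidable (Spec_build_cover_letter_html_py style_css header_html cover_text out) := by unfold Spec_build_cover_letter_html_py; infer_instance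

-- ===== CLAIM (what is proved, stated in full; the proofs are below) =====
def Claim_equal_build_cover_letter_html_py : Prop := ∀ (style_css : String) (header_html : String) (cover_text : String), Dom_build_cover_letter_html_py style_css header_html cover_text → Spec_build_cover_letter_html_py style_css header_html cover_text (build_cover_letter_html_py style_css header_html cover_text)

-- ===== LEMMAS AND PROOFS =====

-- whitespace-stripping facts
theorem pv_rstrip_eq_nil_iff (x : List Char) :
    PySem.Chars.rstrip x = [] ↔ ∀ c ∈ x, PySem.Chars.isspace c := by
  simp [PySem.Chars.rstrip, List.dropWhile_eq_nil_iff]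

theorem pv_strip_eq_nil_iff (x : List Char) :
    PySem.Chars.strip x = [] ↔ ∀ c ∈ x, PySem.Chars.isspace c := by
  simp only [PySem.Chars.strip, pv_rstrip_eq_nil_iff]
  constructor
  · intro h c hc
    rw [← List.takeWhile_append_dropWhile (p := PySem.Chars.isspace) (l := x)] at hc
    rcases List.mem_append.1 hc with h1 | h2
    · exact List.mem_takeWhile_imp h1
    · exact h c h2
  · intro h c hc
    exact h c ((List.dropWhile_suffix _).subset hc)

theorem pv_dropWhile_idem (p : Char → Bool) (l : List Char) :
    (l.dropWhile p).dropWhile p = l.dropWhile p := by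
  cases h : l.dropWhile p with
  | nil => simp
  | cons a t =>
    have ha : p a = false := by
      have := List.dropWhile_get_zero_not p l (by simp [h])
      simpa [h] using this
    simp [ha]

theorem pv_rstrip_idem (x : List Char) :
    PySem.Chars.rstrip (PySem.Chars.rstrip x) = PySem.Chars.rstrip x := by
  simp [PySem.Chars.rstrip, pv_dropWhile_idem]

theorem pv_strip_rstrip (x : List Char) :
    PySem.Chars.strip (PySem.Chars.rstrip x) = PySem.Chars.strip x := by
  by_cases ht : x.dropWhile PySem.Chars.isspace = []
  · have hall : ∀ c ∈ x, PySem.Chars.isspace c := List.dropWhile_eq_nil_iff.1 ht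
    have h1 : PySem.Chars.rstrip x = [] := (pv_rstrip_eq_nil_iff x).2 hall
    have h2 : PySem.Chars.strip x = [] := (pv_strip_eq_nil_iff x).2 hall
    rw [h1, h2]; rfl
  · obtain ⟨c, t', hct⟩ : ∃ c t', x.dropWhile PySem.Chars.isspace = c :: t' := by
      cases h : x.dropWhile PySem.Chars.isspace with
      | nil => exact absurd h ht
      | cons a t => exact ⟨a, t, rfl⟩
    have hc : PySem.Chars.isspace c = false := by
      have := List.dropWhile_get_zero_not PySem.Chars.isspace x (by simp [hct])
      simpa [hct] using this
    set t := x.dropWhile PySem.Chars.isspace with htdef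
    have h1 : PySem.Chars.rstrip t ≠ [] := by
      rw [Ne, pv_rstrip_eq_nil_iff]
      intro h
      have := h c (by rw [hct]; exact List.mem_cons_self)
      simp [hc] at this
    -- rstrip (s ++ t) = s ++ rstrip t
    have h2 : PySem.Chars.rstrip x = x.takeWhile PySem.Chars.isspace ++ PySem.Chars.rstrip t := by
      have hne : ((t.reverse).dropWhile PySem.Chars.isspace).isEmpty = false := by
        rw [List.isEmpty_eq_false_iff]
        intro hnil
        exact h1 (by simp [PySem.Chars.rstrip, hnil])
      have hx : x.reverse = t.reverse ++ (x.takeWhile PySem.Chars.isspace).reverse := by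
        rw [← List.reverse_append, List.takeWhile_append_dropWhile]
      rw [PySem.Chars.rstrip, PySem.Chars.rstrip, hx, List.dropWhile_append, hne]
      simp
    -- head of rstrip t is c
    obtain ⟨ds, hds⟩ : ∃ ds, PySem.Chars.rstrip t = c :: ds := by
      have hpre : PySem.Chars.rstrip t <+: t := by
        rw [PySem.Chars.rstrip, ← List.reverse_reverse t]
        exact (List.reverse_prefix).2 (by rw [List.reverse_reverse]; exact List.dropWhile_suffix _)
      obtain ⟨u, hu⟩ := hpre
      cases hrt : PySem.Chars.rstrip t with
      | nil => exact absurd hrt h1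
      | cons d ds =>
        rw [hrt] at hu
        rw [hct] at hu
        injection hu with hd _
        exact ⟨ds, by rw [hd]⟩
    have hsnil : (x.takeWhile PySem.Chars.isspace).dropWhile PySem.Chars.isspace = [] :=
      List.dropWhile_eq_nil_iff.2 (fun a ha => List.mem_takeWhile_imp ha)
    -- both sides reduce to rstrip t
    have lhs : PySem.Chars.strip (PySem.Chars.rstrip x) = PySem.Chars.rstrip t := by
      rw [h2]
      show PySem.Chars.rstrip (PySem.Chars.lstrip _) = _
      rw [PySem.Chars.lstrip, List.dropWhile_append, hsnil]
      simp only [List.isEmpty_nil, if_true]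
      rw [hds, List.dropWhile_cons_of_neg (by simp [hc]), ← hds, pv_rstrip_idem]
    have rhs : PySem.Chars.strip x = PySem.Chars.rstrip t := by
      show PySem.Chars.rstrip (PySem.Chars.lstrip x) = _
      rw [PySem.Chars.lstrip]
    rw [lhs, rhs]

-- chunk machinery (proof-only helpers)
def pvParasOf (gs : List (List (List Char))) : List (List Char) :=
  (gs.filter (fun g => !g.isEmpty)).map (fun g => PySem.Chars.strip (PySem.Chars.join [' '] g))

def pvConsFirst (buf : List (List Char)) (gs : List (List (List Char))) :
    List (List (List Char)) :=
  (buf ++ gs.headD []) :: gs.tail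

def pvA_flush (st : List (List Char) × List (List Char)) : List (List Char) :=
  if st.2.isEmpty then st.1 else st.1 ++ [pvA_mkPara st.2]

theorem pvB_chunks_ne_nil (ls : List (List Char)) : pvB_chunks ls ≠ [] := by
  cases ls with
  | nil => simp [pvB_chunks]
  | cons l rest => simp only [pvB_chunks]; split <;> simp

theorem pvConsFirst_nil (gs : List (List (List Char))) (h : gs ≠ []) :
    pvConsFirst [] gs = gs := by
  cases gs with
  | nil => exact absurd rfl h
  | cons g t => simp [pvConsFirst]

theorem pv_main_fold (lines : List (List Char)) (ps buf : List (List Char)) :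
    pvA_flush (lines.foldl pvA_step (ps, buf))
    = ps ++ pvParasOf (pvConsFirst buf (pvB_chunks lines)) := by
  induction lines generalizing ps buf with
  | nil =>
    by_cases hb : buf = [] <;>
      simp [pvA_flush, pvB_chunks, pvConsFirst, pvParasOf, pvA_mkPara, hb]
  | cons l rest ih =>
    rw [List.foldl_cons]
    by_cases hb : (PySem.Chars.strip l).isEmpty
    · have hstep : pvA_step (ps, buf) l =
          if buf.isEmpty then (ps, buf) else (ps ++ [pvA_mkPara buf], []) := by
        simp [pvA_step, hb]
      have hch : pvB_chunks (l :: rest) = [] :: pvB_chunks rest := by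
        simp [pvB_chunks, hb]
      by_cases hbuf : buf = []
      · subst hbuf
        rw [hstep]
        simp only [List.isEmpty_nil, if_true]
        rw [ih, hch]
        rw [pvConsFirst_nil _ (pvB_chunks_ne_nil rest)]
        simp [pvConsFirst, pvParasOf]
      · rw [hstep]
        rw [if_neg (by simp [hbuf])]
        rw [ih, pvConsFirst_nil _ (pvB_chunks_ne_nil rest), hch]
        simp [pvConsFirst, pvParasOf, pvA_mkPara, hbuf]
    · have hstep : pvA_step (ps, buf) l = (ps, buf ++ [PySem.Chars.strip l]) := by
        simp [pvA_step, hb]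
      rw [hstep, ih]
      have hch : pvB_chunks (l :: rest) =
          (PySem.Chars.strip l :: (pvB_chunks rest).headD []) :: (pvB_chunks rest).tail := by
        simp [pvB_chunks, hb]
      rw [hch]
      simp [pvConsFirst]

theorem pv_paragraphs_eq (cover_text : String) :
    pvA_paragraphs cover_text = pvB_paragraphs cover_text := by
  unfold pvA_paragraphs
  simp only []
  set L := PySem.Chars.splitlines (PySem.Chars.strip cover_text.toList) with hL
  have hfilter : (L.map PySem.Chars.rstrip).filter
      (fun l => !(PySem.Chars.strip l).isEmpty || l.isEmpty) = L.map PySem.Chars.rstrip := by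
    rw [List.filter_eq_self]
    intro l hl
    obtain ⟨x, _, rfl⟩ := List.mem_map.1 hl
    by_cases hx : PySem.Chars.strip x = []
    · have : PySem.Chars.rstrip x = [] :=
        (pv_rstrip_eq_nil_iff x).2 ((pv_strip_eq_nil_iff x).1 hx)
      simp [this]
    · have : PySem.Chars.strip (PySem.Chars.rstrip x) ≠ [] := by
        rw [pv_strip_rstrip]; exact hx
      simp [this]
  rw [hfilter, List.foldl_map]
  have hcong : (fun (acc : List (List Char) × List (List Char)) (x : List Char) =>
      pvA_step acc (PySem.Chars.rstrip x)) = pvA_step := by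
    funext acc x
    simp [pvA_step, pv_strip_rstrip]
  rw [hcong]
  have := pv_main_fold L [] []
  rw [pvConsFirst_nil _ (pvB_chunks_ne_nil L)] at this
  simpa [pvA_flush, pvB_paragraphs, pvParasOf] using this

theorem pv_style_eq (paras : List (List Char)) (i : Nat) :
    pvA_styleGo paras i = pvB_style (paras.drop i) := by
  have H : ∀ n i, paras.length - i ≤ n →
      pvA_styleGo paras i = pvB_style (paras.drop i) := by
    intro n
    induction n with
    | zero =>
      intro i hi
      have h : ¬ i < paras.length := by omega
      rw [pvA_styleGo, List.drop_eq_nil_of_le (by omega)]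
      simp [h, pvB_style]
    | succ n ihn =>
      intro i hi
      by_cases h : i < paras.length
      · rw [pvA_styleGo, List.drop_eq_getElem_cons h, pvB_style]
        simp only [dif_pos h]
        by_cases hsig : PySem.Chars.startswith (PySem.Chars.lower paras[i])
            ("kind regards".toList) = true
        · simp only [hsig, if_true]
          by_cases h2 : i + 1 < paras.length
          · rw [List.drop_eq_getElem_cons h2]
            simp only [List.take_succ_cons, List.take_zero, List.map_cons, List.map_nil]
            simp [List.getD_eq_getElem?_getD, List.getElem?_eq_getElem h2]
            exact h2
          · rw [List.drop_eq_nil_of_le (by omega)]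
            simp [h2]
        · simp only [eq_false_of_ne_true hsig, Bool.false_eq_true, if_false]
          rw [ihn (i + 1) (by omega)]
      · rw [pvA_styleGo, List.drop_eq_nil_of_le (by omega)]
        simp [h, pvB_style]
  exact H (paras.length - i) i le_rfl

theorem pv_tags (l : List (List Char)) (p : String × List Char) (hp : p ∈ pvB_style l) :
    p.1 = "signature" ∨ p.1 = "body" := by
  induction l with
  | nil => simp [pvB_style] at hp
  | cons head rest ih =>
    rw [pvB_style] at hp
    split at hp
    · rcases List.mem_cons.1 hp with h | h
      · left; rw [h]
      · obtain ⟨q, _, rfl⟩ := List.mem_map.1 h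
        left; rfl
    · rcases List.mem_cons.1 hp with h | h
      · right; rw [h]
      · exact ih h

-- ===== VERDICT (by name: the statement is the Claim_ definition above) =====
theorem build_cover_letter_html_py_spec : Claim_equal_build_cover_letter_html_py := by
  intro style_css header_html cover_text _
  unfold Spec_build_cover_letter_html_py
  simp only [build_cover_letter_html_py, build_cover_letter_html_py_alt]
  congr 1
  rw [pv_paragraphs_eq, pv_style_eq]
  simp only [List.drop_zero]
  rw [PySem.List.foldl_append_singleton_eq_map, List.nil_append]
  congr 1
  refine List.map_congr_left (fun p hp => ?_)
  rcases pv_tags _ p hp with h | h <;>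
    simp only [pvA_block, h] <;> rfl
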